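-- pv_equiv track=rewrite | github.com/rivermont/project-euler | solutions/005.py | is_completely_divisible
-- ===== SOURCE A (Python) =====
-- def is_completely_divisible(num, lis):
-- 	'''
-- 	Returns True if num is divisible by every element in lis,
-- 	otherwise returns False.
-- 	'''
-- 	i = 0
-- 	for item in lis:
-- 		if num % item == 0:
-- 			i += 1
-- 	if i == len(lis):
-- 		return True
-- 	return False
-- ===== SOURCE B (Python) =====
-- def _gcd(a, b):
-- 	a, b = abs(a), abs(b)
-- 	while b:
-- 		a, b = b, a % b
-- 	return a
--
--
-- def is_completely_divisible(num, lis):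
-- 	'''
-- 	Returns True if num is divisible by every element in lis,
-- 	otherwise returns False.
-- 	'''
-- 	if num == 0:
-- 		return True
-- 	l = 1
-- 	for item in lis:
-- 		l = abs(l * item) // _gcd(l, item)
-- 		if num % l != 0:
-- 			return False
-- 	return True
-- ===== Notes on version B (the rewrite author's own statement) =====
-- stated objective: alternative
-- what changed: Replaces the per-element divisibility count compared against len(lis) with folding an aggregate lcm of the list (via a hand-written gcd) and testing divisibility of num by the running lcm, returning False as soon as it fails.
import Mathlib
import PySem

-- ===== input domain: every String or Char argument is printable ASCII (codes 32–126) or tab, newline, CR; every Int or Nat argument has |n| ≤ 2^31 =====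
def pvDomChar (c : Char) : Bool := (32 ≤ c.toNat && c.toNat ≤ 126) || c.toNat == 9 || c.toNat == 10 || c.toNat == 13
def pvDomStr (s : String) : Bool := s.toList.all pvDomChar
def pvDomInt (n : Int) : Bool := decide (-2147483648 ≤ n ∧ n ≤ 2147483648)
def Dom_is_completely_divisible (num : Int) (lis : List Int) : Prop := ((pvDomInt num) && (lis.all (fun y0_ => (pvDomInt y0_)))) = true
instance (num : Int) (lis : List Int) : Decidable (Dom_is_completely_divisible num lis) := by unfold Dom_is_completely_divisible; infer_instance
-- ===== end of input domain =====

-- B replaces A's per-element divisibility count with an lcm fold, returning False as soon as the running lcm stops dividing num; equal return value on Pre_ (no zero element, where A raises ZeroDivisionError).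

-- ===== PORT A =====
def is_completely_divisible (num : Int) (lis : List Int) : Bool :=
  let i : Int := lis.foldl (fun i item => if PySem.Int.mod num item = 0 then i + 1 else i) 0
  if i = (lis.length : Int) then true else false

-- ===== PORT B =====
-- hand-written Euclid from Source B's _gcd (on absolute values)
def pvGcd : Nat → Nat → Nat
  | a, 0 => a
  | a, (b + 1) => pvGcd (b + 1) (a % (b + 1))
decreasing_by exact Nat.mod_lt _ (Nat.succ_pos b)

-- Source B's loop: fold the lcm, return False as soon as it stops dividing num
def pvAltLoop (num : Int) : List Int → Int → Bool
  | [], _ => true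
  | item :: rest, l =>
      let l' : Int := ((l * item).natAbs / pvGcd l.natAbs item.natAbs : Nat)
      if PySem.Int.mod num l' ≠ 0 then false else pvAltLoop num rest l'

def is_completely_divisible_alt (num : Int) (lis : List Int) : Bool :=
  if num = 0 then true else pvAltLoop num lis 1

-- ===== PRECONDITION & SPEC =====
-- excludes exactly the inputs where A (num % 0) raises ZeroDivisionError
def Pre_is_completely_divisible (num : Int) (lis : List Int) : Prop := ∀ x ∈ lis, x ≠ 0
instance (num : Int) (lis : List Int) : Decidable (Pre_is_completely_divisible num lis) := by unfold Pre_is_completely_divisible; infer_instance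
def pvWitness_is_completely_divisible : Int × List Int := (12, [2, 3, 4])

def Spec_is_completely_divisible (num : Int) (lis : List Int) (out : Bool) : Prop := out = is_completely_divisible_alt num lis
instance (num : Int) (lis : List Int) (out : Bool) : Decidable (Spec_is_completely_divisible num lis out) := by unfold Spec_is_completely_divisible; infer_instance

-- ===== CLAIM =====
def Claim_equal_is_completely_divisible : Prop := ∀ (num : Int) (lis : List Int), Dom_is_completely_divisible num lis → Pre_is_completely_divisible num lis → Spec_is_completely_divisible num lis (is_completely_divisible num lis)

-- ===== LEMMAS AND PROOFS =====

theorem pvGcd_eq (a b : Nat) : pvGcd a b = Nat.gcd b a := by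
  induction a, b using pvGcd.induct with
  | case1 a => simp [pvGcd]
  | case2 a b ih =>
    rw [Nat.gcd_rec (b + 1) a, ← ih]
    conv_lhs => rw [pvGcd]

-- Source B's lcm-fold step equals Int.lcm
theorem step_eq_lcm (l item : Int) :
    (((l * item).natAbs / pvGcd l.natAbs item.natAbs : Nat) : Int) = (Int.lcm l item : Int) := by
  rw [pvGcd_eq, Nat.gcd_comm]
  simp [Int.lcm, Nat.lcm, Int.natAbs_mul]

-- B's loop decides "every element divides num" given the accumulator divides num
theorem pvAltLoop_eq (num : Int) (lis : List Int) : ∀ (l : Int), l ≠ 0 → l ∣ num →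
    (∀ x ∈ lis, x ≠ 0) →
    pvAltLoop num lis l = decide (∀ x ∈ lis, x ∣ num) := by
  induction lis with
  | nil => intro l _ _ _; simp [pvAltLoop]
  | cons x xs ih =>
    intro l hl hdvd h
    have hx : x ≠ 0 := h x List.mem_cons_self
    have hl' : (Int.lcm l x : Int) ≠ 0 := by simp [Int.lcm_eq_zero_iff, hl, hx]
    have hmod : PySem.Int.mod num (Int.lcm l x : Int) = 0 ↔ l ∣ num ∧ x ∣ num := by
      rw [PySem.Int.mod_eq_zero_iff_dvd, Int.coe_lcm, lcm_dvd_iff]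
    rw [pvAltLoop]
    simp only [step_eq_lcm]
    by_cases hxd : x ∣ num
    · rw [if_neg (by simp [hmod, hdvd, hxd]),
        ih _ hl' (by rw [Int.coe_lcm]; exact lcm_dvd hdvd hxd)
          (fun y hy => h y (List.mem_cons_of_mem _ hy))]
      simp [hxd]
    · rw [if_pos (by simp [hmod, hxd]), eq_comm, decide_eq_false_iff_not]
      exact fun hall => hxd (hall x List.mem_cons_self)

-- ===== VERDICT =====
theorem is_completely_divisible_spec : Claim_equal_is_completely_divisible := by
  intro num lis _ hpre
  unfold Spec_is_completely_divisible is_completely_divisible is_completely_divisible_alt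
  simp only
  have hcnt : lis.foldl (fun i item => if PySem.Int.mod num item = 0 then i + 1 else i) (0 : Int)
      = (List.countP (fun item => decide (PySem.Int.mod num item = 0)) lis : Int) := by
    simpa using PySem.List.foldl_count_if (fun item => decide (PySem.Int.mod num item = 0)) lis 0
  have hiff1 : ((List.countP (fun item => decide (PySem.Int.mod num item = 0)) lis : Int)
      = (lis.length : Int)) ↔ ∀ x ∈ lis, x ∣ num := by
    rw [Nat.cast_inj, List.countP_eq_length]
    simp only [decide_eq_true_eq]
    constructor
    · exact fun h x hx => (PySem.Int.mod_eq_zero_iff_dvd num x).mp (h x hx)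
    · exact fun h x hx => (PySem.Int.mod_eq_zero_iff_dvd num x).mpr (h x hx)
  have hB : (if num = 0 then true else pvAltLoop num lis 1) = decide (∀ x ∈ lis, x ∣ num) := by
    by_cases hz : num = 0
    · simp [hz]
    · rw [if_neg hz, pvAltLoop_eq num lis 1 one_ne_zero (one_dvd num) hpre]
  rw [hcnt, hB]
  by_cases hall : ∀ x ∈ lis, x ∣ num
  · rw [if_pos (hiff1.mpr hall), eq_comm, decide_eq_true_eq]
    exact hall
  · rw [if_neg (fun hc => hall (hiff1.mp hc)), eq_comm, decide_eq_false_iff_not]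
    exact hall
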